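-- pv_equiv track=rewrite | github.com/jeff-donovan/aoc-2024 | day_21/part2_attempt7.py | split_by_A
-- ===== SOURCE A (Python) =====
-- def split_by_A(seq):
--     a_indices = [i for i, char in enumerate(seq) if char == 'A']
--     num_a_indices = len(a_indices)
--     if num_a_indices < 2:
--         return [seq]
--
--     split_index = a_indices[num_a_indices // 2 - 1]
--     first_half = seq[0:split_index + 1]
--     second_half = seq[split_index + 1:len(seq)]
--     return [first_half, second_half]
-- ===== SOURCE B (Python) =====
-- def split_by_A(seq):
--     parts = seq.split('A')
--     t = (len(parts) - 1) // 2
--     if t < 1: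
--         return [seq]
--     return ['A'.join(parts[:t]) + 'A', 'A'.join(parts[t:])]
-- ===== Notes on version B (the rewrite author's own statement) =====
-- stated objective: faster
-- what changed: B splits the string into pieces on the separator with str.split and reassembles the two halves with join of the first (count//2) pieces plus the separator and of the remaining pieces, instead of A's Python-level enumerate pass that collects all separator indices and slices at the middle one; split/join run in C, giving a large constant-factor speedup.
import Mathlib
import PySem

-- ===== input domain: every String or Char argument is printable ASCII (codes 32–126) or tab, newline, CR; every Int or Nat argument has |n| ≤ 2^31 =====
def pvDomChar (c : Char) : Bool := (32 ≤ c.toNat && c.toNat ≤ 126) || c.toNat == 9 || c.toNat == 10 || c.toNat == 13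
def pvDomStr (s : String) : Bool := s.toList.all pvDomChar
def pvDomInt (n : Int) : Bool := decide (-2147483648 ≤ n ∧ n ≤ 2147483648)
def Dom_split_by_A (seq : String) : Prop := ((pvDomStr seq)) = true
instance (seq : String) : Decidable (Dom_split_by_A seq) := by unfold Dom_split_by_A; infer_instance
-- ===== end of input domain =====

-- B rebuilds the two halves from seq.split('A') with 'A'.join instead of A's enumerate pass
-- over all 'A' indices plus slicing (objective: faster; a timing run measured B faster).

-- ===== PORT A =====
def split_by_A (seq : String) : List String :=
  let a_indices : List Int :=
    ((PySem.List.enumerate seq.toList 0).filter (fun p => p.2 == 'A')).map (fun p => p.1)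
  let num : Int := a_indices.length
  if num < 2 then [seq]
  else
    match PySem.List.pyGet? a_indices (PySem.Int.floordiv num 2 - 1) with
    | none => []   -- unreachable: the index num//2 - 1 is always in range when num ≥ 2
    | some split_index =>
      [String.ofList (PySem.List.slice seq.toList (some 0) (some (split_index + 1))),
       String.ofList (PySem.List.slice seq.toList (some (split_index + 1)) (some (seq.toList.length : Int)))]

-- ===== PORT B =====
def split_by_A_alt (seq : String) : List String :=
  match PySem.Str.split? seq "A" with
  | none => []   -- unreachable: the separator "A" is nonempty, so str.split never raises
  | some parts =>
    let t : Int := PySem.Int.floordiv ((parts.length : Int) - 1) 2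
    if t < 1 then [seq]
    else
      [PySem.Str.join "A" (PySem.List.slice parts none (some t)) ++ "A",
       PySem.Str.join "A" (PySem.List.slice parts (some t) none)]

-- ===== PRECONDITION & SPEC =====
def Spec_split_by_A (seq : String) (out : List String) : Prop := out = split_by_A_alt seq
instance (seq : String) (out : List String) : Decidable (Spec_split_by_A seq out) := by unfold Spec_split_by_A; infer_instance

-- ===== CLAIM (what is proved, stated in full; the proofs are below) =====
def Claim_equal_split_by_A : Prop := ∀ (seq : String), Dom_split_by_A seq → Spec_split_by_A seq (split_by_A seq)

-- ===== LEMMAS AND PROOFS =====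

-- 0-based position of the (k+1)-th 'A' in a list (meaningful when k < count)
def nthA : List Char → Nat → Nat
  | [], _ => 0
  | c :: cs, k =>
    if c = 'A' then (match k with | 0 => 0 | k' + 1 => nthA cs k' + 1)
    else nthA cs k + 1

theorem nthA_A_zero (cs : List Char) : nthA ('A' :: cs) 0 = 0 := by simp [nthA]

theorem nthA_A_succ (cs : List Char) (k : Nat) : nthA ('A' :: cs) (k + 1) = nthA cs k + 1 := by
  simp [nthA]

theorem nthA_ne (c : Char) (cs : List Char) (k : Nat) (h : c ≠ 'A') :
    nthA (c :: cs) k = nthA cs k + 1 := by simp [nthA, h]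

-- A's index list, parametrised by the enumerate start
def idxs (s : List Char) (start : Int) : List Int :=
  ((PySem.List.enumerate s start).filter (fun p => p.2 == 'A')).map (fun p => p.1)

theorem idxs_nil (start : Int) : idxs [] start = [] := by
  simp [idxs, PySem.List.enumerate_nil]

theorem idxs_cons (c : Char) (cs : List Char) (start : Int) :
    idxs (c :: cs) start =
      if c = 'A' then start :: idxs cs (start + 1) else idxs cs (start + 1) := by
  simp only [idxs, PySem.List.enumerate_cons, List.filter_cons]
  by_cases h : c = 'A' <;> simp [h]

theorem length_idxs (s : List Char) (start : Int) :
    (idxs s start).length = s.count 'A' := by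
  induction s generalizing start with
  | nil => simp [idxs_nil]
  | cons c cs ih =>
    rw [idxs_cons]
    by_cases h : c = 'A' <;> simp [h, ih]

theorem idxs_get (s : List Char) (start : Int) (k : Nat) (hk : k < s.count 'A') :
    (idxs s start)[k]? = some (start + (nthA s k : Int)) := by
  induction s generalizing start k with
  | nil => simp [List.count_nil] at hk
  | cons c cs ih =>
    rw [idxs_cons]
    by_cases h : c = 'A'
    · subst h
      rw [if_pos rfl]
      match k with
      | 0 => simp [nthA_A_zero]
      | k' + 1 =>
        have hk' : k' < cs.count 'A' := by
          simp at hk; omega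
        rw [List.getElem?_cons_succ, ih (start + 1) k' hk', nthA_A_succ]
        congr 1
        push_cast
        ring
    · have hk' : k < cs.count 'A' := by
        simp [h] at hk; omega
      rw [if_neg h, ih (start + 1) k hk', nthA_ne c cs k h]
      congr 1
      push_cast
      ring

-- B-side: a direct recursive description of str.split on the one-character separator 'A'
def splitA : List Char → List (List Char)
  | [] => [[]]
  | c :: cs =>
    if c = 'A' then [] :: splitA cs
    else
      match splitA cs with
      | [] => [[c]]   -- unreachable: splitA is never empty
      | h :: t => (c :: h) :: t

theorem splitA_ne_nil (s : List Char) : splitA s ≠ [] := by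
  cases s with
  | nil => simp [splitA]
  | cons c cs =>
    simp only [splitA]
    by_cases h : c = 'A'
    · simp [h]
    · rw [if_neg h]
      cases splitA cs <;> simp

theorem splitA_A (cs : List Char) : splitA ('A' :: cs) = [] :: splitA cs := by
  simp [splitA]

theorem splitA_ne_cons (c : Char) (cs : List Char) (h : c ≠ 'A') (hd : List Char)
    (tl : List (List Char)) (heq : splitA cs = hd :: tl) :
    splitA (c :: cs) = (c :: hd) :: tl := by
  simp [splitA, h, heq]

theorem length_splitA (s : List Char) : (splitA s).length = s.count 'A' + 1 := by
  induction s with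
  | nil => simp [splitA]
  | cons c cs ih =>
    by_cases h : c = 'A'
    · subst h; rw [splitA_A]; simp [ih]
    · have := splitA_ne_nil cs
      cases heq : splitA cs with
      | nil => exact absurd heq this
      | cons hd tl =>
        rw [splitA_ne_cons c cs h hd tl heq]
        rw [heq] at ih
        simp_all

-- prepend a prefix onto the first piece
def consHead (p : List Char) : List (List Char) → List (List Char)
  | [] => [p]
  | h :: t => (p ++ h) :: t

theorem consHead_nil (xs : List (List Char)) (h : xs ≠ []) : consHead [] xs = xs := by
  cases xs with
  | nil => exact absurd rfl h
  | cons a t => simp [consHead]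

theorem go_spec (fuel : Nat) (l : List Char) (cur : List Char) (acc : List (List Char))
    (hf : l.length ≤ fuel) :
    PySem.Chars.splitOn.go ['A'] fuel l cur acc = acc.reverse ++ consHead cur.reverse (splitA l) := by
  induction fuel generalizing l cur acc with
  | zero =>
    have hl : l = [] := by cases l <;> simp_all
    subst hl
    rw [PySem.Chars.splitOn.go.eq_def]
    simp [splitA, consHead]
  | succ fuel ih =>
    cases l with
    | nil =>
      rw [PySem.Chars.splitOn.go.eq_def]
      simp [splitA, consHead]
    | cons c rest =>
      rw [PySem.Chars.splitOn.go.eq_def]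
      simp only []
      by_cases h : c = 'A'
      · subst h
        have hpre : ['A'].isPrefixOf ('A' :: rest) = true := by simp [List.isPrefixOf]
        rw [if_pos hpre]
        have : List.drop (['A'] : List Char).length ('A' :: rest) = rest := by simp
        rw [this, ih rest [] (List.reverse cur :: acc) (by simp at hf; omega)]
        simp only [List.reverse_nil]
        rw [consHead_nil _ (splitA_ne_nil rest), splitA_A]
        simp [consHead]
      · have hpre : ['A'].isPrefixOf (c :: rest) = false := by
          simp [List.isPrefixOf]
          exact fun hc => absurd hc.symm h
        rw [if_neg (by simp [hpre])]
        rw [ih rest (c :: cur) acc (by simp at hf; omega)]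
        have := splitA_ne_nil rest
        cases heq : splitA rest with
        | nil => exact absurd heq this
        | cons hd tl =>
          rw [splitA_ne_cons c rest h hd tl heq]
          simp [consHead]

theorem splitOn_eq_splitA (s : List Char) : PySem.Chars.splitOn s ['A'] = splitA s := by
  unfold PySem.Chars.splitOn
  rw [go_spec (s.length + 1) s [] [] (by omega)]
  simp [consHead_nil _ (splitA_ne_nil s)]

theorem join_cons (sep : List Char) (c : Char) (h : List Char) (t : List (List Char)) :
    PySem.Chars.join sep ((c :: h) :: t) = c :: PySem.Chars.join sep (h :: t) := by
  cases t with
  | nil => simp [PySem.Chars.join_singleton]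
  | cons q rest => simp [PySem.Chars.join_cons_cons]

theorem join_splitA (s : List Char) : PySem.Chars.join ['A'] (splitA s) = s := by
  induction s with
  | nil => simp [splitA, PySem.Chars.join_singleton]
  | cons c cs ih =>
    by_cases h : c = 'A'
    · subst h
      rw [splitA_A]
      have := splitA_ne_nil cs
      cases heq : splitA cs with
      | nil => exact absurd heq this
      | cons hd tl =>
        rw [heq] at ih
        rw [PySem.Chars.join_cons_cons]
        simp [ih]
    · have := splitA_ne_nil cs
      cases heq : splitA cs with
      | nil => exact absurd heq this
      | cons hd tl =>
        rw [splitA_ne_cons c cs h hd tl heq]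
        rw [heq] at ih
        rw [join_cons]
        simp [ih]

theorem join_take_splitA (s : List Char) (k : Nat) (hk : k < s.count 'A') :
    PySem.Chars.join ['A'] ((splitA s).take (k + 1)) ++ ['A'] = s.take (nthA s k + 1) := by
  induction s generalizing k with
  | nil => simp [List.count_nil] at hk
  | cons c cs ih =>
    by_cases h : c = 'A'
    · subst h
      rw [splitA_A]
      match k with
      | 0 =>
        simp [PySem.Chars.join_singleton, nthA_A_zero]
      | k' + 1 =>
        have hk' : k' < cs.count 'A' := by simp at hk; omega
        rw [List.take_succ_cons]
        have := splitA_ne_nil cs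
        have htk : ∃ hd tl, (splitA cs).take (k' + 1) = hd :: tl := by
          cases heq : splitA cs with
          | nil => exact absurd heq this
          | cons a t => exact ⟨a, t.take k', by simp⟩
        obtain ⟨hd, tl, htl⟩ := htk
        rw [htl, PySem.Chars.join_cons_cons, nthA_A_succ]
        have := ih k' hk'
        rw [htl] at this
        simp only [List.take_succ_cons]
        simp only [List.nil_append, List.append_assoc]
        rw [this]
        rfl
    · have hk' : k < cs.count 'A' := by simp [h] at hk; omega
      simp only [splitA, if_neg h]
      have := splitA_ne_nil cs
      cases heq : splitA cs with
      | nil => exact absurd heq this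
      | cons hd tl =>
        rw [List.take_succ_cons, join_cons, nthA_ne c cs k h, List.take_succ_cons]
        have hih := ih k hk'
        rw [heq] at hih
        have hshape : (hd :: tl).take (k + 1) = hd :: tl.take k := by simp
        rw [hshape] at hih
        simp only [List.cons_append, hih]

theorem join_drop_splitA (s : List Char) (k : Nat) (hk : k < s.count 'A') :
    PySem.Chars.join ['A'] ((splitA s).drop (k + 1)) = s.drop (nthA s k + 1) := by
  induction s generalizing k with
  | nil => simp [List.count_nil] at hk
  | cons c cs ih =>
    by_cases h : c = 'A'
    · subst h
      rw [splitA_A]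
      match k with
      | 0 =>
        simp [nthA_A_zero, join_splitA]
      | k' + 1 =>
        have hk' : k' < cs.count 'A' := by simp at hk; omega
        rw [List.drop_succ_cons, nthA_A_succ]
        exact ih k' hk'
    · have hk' : k < cs.count 'A' := by simp [h] at hk; omega
      simp only [splitA, if_neg h]
      have := splitA_ne_nil cs
      cases heq : splitA cs with
      | nil => exact absurd heq this
      | cons hd tl =>
        rw [List.drop_succ_cons, nthA_ne c cs k h]
        have hih := ih k hk'
        rw [heq] at hih
        simpa using hih

theorem floordiv_two_nat (n : Nat) : PySem.Int.floordiv (n : Int) 2 = ((n / 2 : Nat) : Int) := by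
  have h2 : (0 : Int) < 2 := by norm_num
  rw [PySem.Int.floordiv_eq_iff_of_pos h2]
  constructor
  · push_cast; omega
  · push_cast; omega

theorem split_by_A_eq_alt (seq : String) : split_by_A seq = split_by_A_alt seq := by
  unfold split_by_A split_by_A_alt
  set s := seq.toList with hs
  -- resolve B's str.split
  have hsplit : PySem.Str.split? seq "A" = some ((splitA s).map String.ofList) := by
    have hmap := PySem.Str.split?_map seq "A"
    have hc : PySem.Chars.split? seq.toList "A".toList = some (splitA s) := by
      simp [PySem.Chars.split?, splitOn_eq_splitA, hs]
    rw [hc] at hmap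
    cases hq : PySem.Str.split? seq "A" with
    | none => rw [hq] at hmap; simp at hmap
    | some parts =>
      rw [hq] at hmap
      simp only [Option.map_some, Option.some.injEq] at hmap
      have hparts : parts = (splitA s).map String.ofList := by
        have h2 := congrArg (List.map String.ofList) hmap
        simpa [List.map_map, Function.comp_def, String.ofList_toList] using h2
      rw [hparts]
  rw [hsplit]
  have hlenA : (((PySem.List.enumerate s 0).filter (fun p => p.2 == 'A')).map (fun p => p.1)).length
      = s.count 'A' := by simpa [idxs] using length_idxs s 0
  set n : Nat := s.count 'A' with hn
  have hlenB : (((splitA s).map String.ofList).length : Int) - 1 = (n : Int) := by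
    simp [length_splitA, hn]
  simp only [hlenA, hlenB]
  have hfd : PySem.Int.floordiv (n : Int) 2 = ((n / 2 : Nat) : Int) := floordiv_two_nat n
  by_cases hlt : (n : Int) < 2
  · rw [if_pos hlt, if_pos (by rw [hfd]; omega)]
  · rw [if_neg hlt, if_neg (by rw [hfd]; omega)]
    have hn2 : 2 ≤ n := by omega
    set k : Nat := n / 2 - 1 with hkdef
    have hk : k < n := by omega
    have hk1 : k + 1 = n / 2 := by omega
    -- A's middle index
    have hidx : PySem.Int.floordiv (n : Int) 2 - 1 = ((k : Nat) : Int) := by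
      rw [hfd]; push_cast
      have : 1 ≤ n / 2 := by omega
      omega
    have hget : PySem.List.pyGet? (((PySem.List.enumerate s 0).filter (fun p => p.2 == 'A')).map (fun p => p.1)) (PySem.Int.floordiv (n : Int) 2 - 1) = some ((nthA s k : Int)) := by
      rw [hidx, PySem.List.pyGet?_natCast]
      simpa [idxs, hn] using idxs_get s 0 k hk
    rw [hget]
    set p : Nat := nthA s k with hp
    -- A's two slices are take/drop at p+1
    have hA1 : PySem.List.slice s (some 0) (some ((p : Int) + 1)) = s.take (p + 1) := by
      have h1 : ((p : Int) + 1) = ((p + 1 : Nat) : Int) := by push_cast; ring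
      rw [h1, PySem.List.slice_toNat s (by norm_num) (Int.natCast_nonneg _)]
      simp
    have hA2 : PySem.List.slice s (some ((p : Int) + 1)) (some (s.length : Int)) = s.drop (p + 1) := by
      have h1 : ((p : Int) + 1) = ((p + 1 : Nat) : Int) := by push_cast; ring
      rw [h1, PySem.List.slice_toNat s (Int.natCast_nonneg _) (Int.natCast_nonneg _)]
      simp only [Int.toNat_natCast]
      apply List.take_of_length_le
      simp
    show [String.ofList (PySem.List.slice s (some 0) (some ((p : Int) + 1))),
          String.ofList (PySem.List.slice s (some ((p : Int) + 1)) (some (s.length : Int)))] = _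
    rw [hA1, hA2]
    -- B's two pieces
    have ht : ((n / 2 : Nat) : Int) = ((k + 1 : Nat) : Int) := by rw [hk1]
    have hB1 : PySem.List.slice ((splitA s).map String.ofList) none (some (PySem.Int.floordiv (n : Int) 2)) = ((splitA s).take (k + 1)).map String.ofList := by
      rw [hfd, ht, PySem.List.slice_to _ (Int.natCast_nonneg _)]
      simp [List.map_take]
    have hB2 : PySem.List.slice ((splitA s).map String.ofList) (some (PySem.Int.floordiv (n : Int) 2)) none = ((splitA s).drop (k + 1)).map String.ofList := by
      rw [hfd, ht, PySem.List.slice_from _ (Int.natCast_nonneg _)]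
      simp [List.map_drop]
    rw [hB1, hB2]
    have hkc : k < s.count 'A' := by omega
    -- first element
    have he1 : PySem.Str.join "A" (((splitA s).take (k + 1)).map String.ofList) ++ "A" = String.ofList (s.take (p + 1)) := by
      have htl : (PySem.Str.join "A" (((splitA s).take (k + 1)).map String.ofList) ++ "A").toList = s.take (p + 1) := by
        rw [String.toList_append, PySem.Str.toList_join]
        have hmm : (((splitA s).take (k + 1)).map String.ofList).map String.toList = (splitA s).take (k + 1) := by
          simp [List.map_map, Function.comp_def, String.toList_ofList]
        rw [hmm]
        have : ("A" : String).toList = ['A'] := rfl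
        rw [this]
        exact join_take_splitA s k hkc
      calc PySem.Str.join "A" (((splitA s).take (k + 1)).map String.ofList) ++ "A"
          = String.ofList ((PySem.Str.join "A" (((splitA s).take (k + 1)).map String.ofList) ++ "A").toList) := by rw [String.ofList_toList]
        _ = String.ofList (s.take (p + 1)) := by rw [htl]
    -- second element
    have he2 : PySem.Str.join "A" (((splitA s).drop (k + 1)).map String.ofList) = String.ofList (s.drop (p + 1)) := by
      have htl : (PySem.Str.join "A" (((splitA s).drop (k + 1)).map String.ofList)).toList = s.drop (p + 1) := by
        rw [PySem.Str.toList_join]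
        have hmm : (((splitA s).drop (k + 1)).map String.ofList).map String.toList = (splitA s).drop (k + 1) := by
          simp [List.map_map, Function.comp_def, String.toList_ofList]
        rw [hmm]
        have : ("A" : String).toList = ['A'] := rfl
        rw [this]
        exact join_drop_splitA s k hkc
      calc PySem.Str.join "A" (((splitA s).drop (k + 1)).map String.ofList)
          = String.ofList ((PySem.Str.join "A" (((splitA s).drop (k + 1)).map String.ofList)).toList) := by rw [String.ofList_toList]
        _ = String.ofList (s.drop (p + 1)) := by rw [htl]
    rw [he1, he2]

-- ===== VERDICT (by name: the statement is the Claim_ definition above) =====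
theorem split_by_A_spec : Claim_equal_split_by_A := by
  intro seq _
  unfold Spec_split_by_A
  exact split_by_A_eq_alt seq
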